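-- pv_equiv track=rewrite | github.com/notadragon/adventofcode | 2018/23/1.py | border
-- ===== SOURCE A (Python) =====
-- def numpart(total,size):
--     if size == 1:
--         yield (total,)
--     else:
--         for i in range(0,total+1):
--             for rest in numpart(total-i,size-1):
--                 yield (i,) + rest
--
-- def border(star):
--     for d1,d2,d3 in numpart(star[0],3):
--         yield ( star[0] - d1, star[1] - d2, star[2] - d3, )
--         yield ( star[0] - d1, star[1] - d2, star[2] + d3, )
--         yield ( star[0] - d1, star[1] + d2, star[2] - d3, )
--         yield ( star[0] - d1, star[1] + d2, star[2] + d3, )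
--         yield ( star[0] + d1, star[1] - d2, star[2] - d3, )
--         yield ( star[0] + d1, star[1] - d2, star[2] + d3, )
--         yield ( star[0] + d1, star[1] + d2, star[2] - d3, )
--         yield ( star[0] + d1, star[1] + d2, star[2] + d3, )
-- ===== SOURCE B (Python) =====
-- def border(star):
--     total = star[0]
--     for d1 in range(total + 1):
--         for d2 in range(total - d1 + 1):
--             d3 = total - d1 - d2
--             yield (star[0] - d1, star[1] - d2, star[2] - d3)
--             yield (star[0] - d1, star[1] - d2, star[2] + d3)
--             yield (star[0] - d1, star[1] + d2, star[2] - d3)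
--             yield (star[0] - d1, star[1] + d2, star[2] + d3)
--             yield (star[0] + d1, star[1] - d2, star[2] - d3)
--             yield (star[0] + d1, star[1] - d2, star[2] + d3)
--             yield (star[0] + d1, star[1] + d2, star[2] - d3)
--             yield (star[0] + d1, star[1] + d2, star[2] + d3)
-- ===== Notes on version B (the rewrite author's own statement) =====
-- stated objective: simpler
-- what changed: Inlined the generic recursive numpart(total,size) partition generator into border as two explicit nested loops over d1 and d2 with d3 = total - d1 - d2, removing the helper and all intermediate tuple construction while keeping the exact (d1,d2)-lexicographic yield order.
import Mathlib
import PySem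

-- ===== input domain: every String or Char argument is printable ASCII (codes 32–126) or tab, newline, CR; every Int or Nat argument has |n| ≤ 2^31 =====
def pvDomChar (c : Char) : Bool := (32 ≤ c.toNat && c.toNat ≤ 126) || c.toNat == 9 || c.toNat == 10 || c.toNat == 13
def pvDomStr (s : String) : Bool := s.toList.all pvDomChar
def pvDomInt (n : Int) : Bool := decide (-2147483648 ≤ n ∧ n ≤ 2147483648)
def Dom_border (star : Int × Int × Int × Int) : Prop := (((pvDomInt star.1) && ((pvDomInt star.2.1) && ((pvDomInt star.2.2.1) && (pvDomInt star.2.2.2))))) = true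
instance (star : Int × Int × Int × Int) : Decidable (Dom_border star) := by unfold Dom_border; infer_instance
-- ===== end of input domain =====

-- ===== PORT A =====
-- numpart ports A's recursive generator; size is the positive tuple length (Python never calls it with size ≤ 0)
def numpart (total : Int) (size : Nat) : List (List Int) :=
  match size with
  | 0 => []
  | 1 => [[total]]
  | n + 2 =>
      (PySem.List.pyRange 0 (total + 1) 1).flatMap
        (fun i => (numpart (total - i) (n + 1)).map (fun rest => i :: rest))

def border (star : Int × Int × Int × Int) : List (Int × Int × Int) :=
  (numpart star.1 3).flatMap (fun t =>
    match t with
    | [d1, d2, d3] =>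
        [ (star.1 - d1, star.2.1 - d2, star.2.2.1 - d3),
          (star.1 - d1, star.2.1 - d2, star.2.2.1 + d3),
          (star.1 - d1, star.2.1 + d2, star.2.2.1 - d3),
          (star.1 - d1, star.2.1 + d2, star.2.2.1 + d3),
          (star.1 + d1, star.2.1 - d2, star.2.2.1 - d3),
          (star.1 + d1, star.2.1 - d2, star.2.2.1 + d3),
          (star.1 + d1, star.2.1 + d2, star.2.2.1 - d3),
          (star.1 + d1, star.2.1 + d2, star.2.2.1 + d3) ]
    | _ => [])

-- ===== PORT B =====
-- B: the recursive partition helper inlined as two nested loops; same output order.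
def border_alt (star : Int × Int × Int × Int) : List (Int × Int × Int) :=
  let total := star.1
  (PySem.List.pyRange 0 (total + 1) 1).flatMap (fun d1 =>
    (PySem.List.pyRange 0 (total - d1 + 1) 1).flatMap (fun d2 =>
      let d3 := total - d1 - d2
      [ (star.1 - d1, star.2.1 - d2, star.2.2.1 - d3),
        (star.1 - d1, star.2.1 - d2, star.2.2.1 + d3),
        (star.1 - d1, star.2.1 + d2, star.2.2.1 - d3),
        (star.1 - d1, star.2.1 + d2, star.2.2.1 + d3),
        (star.1 + d1, star.2.1 - d2, star.2.2.1 - d3),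
        (star.1 + d1, star.2.1 - d2, star.2.2.1 + d3),
        (star.1 + d1, star.2.1 + d2, star.2.2.1 - d3),
        (star.1 + d1, star.2.1 + d2, star.2.2.1 + d3) ]))

-- ===== PRECONDITION & SPEC =====
def Spec_border (star : Int × Int × Int × Int) (out : List (Int × Int × Int)) : Prop := out = border_alt star
instance (star : Int × Int × Int × Int) (out : List (Int × Int × Int)) : Decidable (Spec_border star out) := by unfold Spec_border; infer_instance

-- ===== CLAIM (what is proved, stated in full; the proofs are below) =====
def Claim_equal_border : Prop := ∀ (star : Int × Int × Int × Int), Dom_border star → Spec_border star (border star)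

-- ===== LEMMAS AND PROOFS =====

-- ===== VERDICT (by name: the statement is the Claim_ definition above) =====
theorem border_spec : Claim_equal_border := by
  intro star _
  unfold Spec_border border border_alt
  simp only [numpart, List.flatMap_map, List.flatMap_assoc]
  rfl
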